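-- pv_equiv track=rewrite | github.com/RUCDM/KB4Rec | Projects/UPGAN/code/util/triple_kernel.py | make_triple_graph_rs_batch
-- ===== SOURCE A (Python) =====
-- def make_triple_graph_rs_batch(path_list, batch_ents, ent_map, interval=100000):
--     list_head_ori = []
--     list_head_map = []
--     list_tail_ori = []
--     batch_ents_order = sorted(batch_ents, key=lambda x: ent_map[x])
--     start = 0
--     edge_list_rs = []
--     tp_ents = []
--     for head in batch_ents_order:
--         assert head in path_list
--         user_list = path_list[head]
--         now_id = ent_map[head]
--         tp_ents.append(now_id)
--         for user in user_list:
--             list_head_ori.append(head)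
--             list_head_map.append(now_id - start)
--             list_tail_ori.append(user)
--         if len(list_head_map) > interval:
--             edge_list_map = [list_head_map, list_tail_ori]
--             edge_list_ori = [list_head_ori, list_tail_ori]
--             edge_list_rs.append((edge_list_map, edge_list_ori, tp_ents))
--             tp_ents = []
--             list_head_ori = []
--             list_head_map = []
--             list_tail_ori = []
--             start = now_id + 1
--     if len(list_head_map) > 0:
--         edge_list_map = [list_head_map, list_tail_ori]
--         edge_list_ori = [list_head_ori, list_tail_ori]
--         edge_list_rs.append((edge_list_map, edge_list_ori, tp_ents))
--     return edge_list_rs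
-- ===== SOURCE B (Python) =====
-- def make_triple_graph_rs_batch(path_list, batch_ents, ent_map, interval=100000):
--     # pass 1: per-head records (head, now_id, user_list) in sort order
--     records = []
--     for head in sorted(batch_ents, key=lambda x: ent_map[x]):
--         assert head in path_list
--         records.append((head, ent_map[head], path_list[head]))
--     # pass 2: partition records into groups at flush points (edge count > interval)
--     groups, cur, cnt = [], [], 0
--     for rec in records:
--         cur.append(rec)
--         cnt += len(rec[2])
--         if cnt > interval:
--             groups.append((cur, True))
--             cur, cnt = [], 0
--     if cur:
--         groups.append((cur, cnt > 0))
--     # pass 3: emit each group with its running start offset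
--     out, start = [], 0
--     for grp, emit in groups:
--         if emit:
--             maps = [now_id - start for _, now_id, users in grp for _ in users]
--             heads = [head for head, _, users in grp for _ in users]
--             tails = [u for _, _, users in grp for u in users]
--             tps = [now_id for _, now_id, _ in grp]
--             out.append(([maps, tails], [heads, tails], tps))
--         start = grp[-1][1] + 1
--     return out
-- ===== Notes on version B (the rewrite author's own statement) =====
-- stated objective: alternative
-- what changed: B replaces A's single interleaved pass by three staged passes: it first builds per-head (head, now_id, user_list) records in sort order, then partitions the record list into groups at the flush points using only an edge counter, and finally emits each group's output tuple in a third pass that threads the running start offset.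
import Mathlib
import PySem

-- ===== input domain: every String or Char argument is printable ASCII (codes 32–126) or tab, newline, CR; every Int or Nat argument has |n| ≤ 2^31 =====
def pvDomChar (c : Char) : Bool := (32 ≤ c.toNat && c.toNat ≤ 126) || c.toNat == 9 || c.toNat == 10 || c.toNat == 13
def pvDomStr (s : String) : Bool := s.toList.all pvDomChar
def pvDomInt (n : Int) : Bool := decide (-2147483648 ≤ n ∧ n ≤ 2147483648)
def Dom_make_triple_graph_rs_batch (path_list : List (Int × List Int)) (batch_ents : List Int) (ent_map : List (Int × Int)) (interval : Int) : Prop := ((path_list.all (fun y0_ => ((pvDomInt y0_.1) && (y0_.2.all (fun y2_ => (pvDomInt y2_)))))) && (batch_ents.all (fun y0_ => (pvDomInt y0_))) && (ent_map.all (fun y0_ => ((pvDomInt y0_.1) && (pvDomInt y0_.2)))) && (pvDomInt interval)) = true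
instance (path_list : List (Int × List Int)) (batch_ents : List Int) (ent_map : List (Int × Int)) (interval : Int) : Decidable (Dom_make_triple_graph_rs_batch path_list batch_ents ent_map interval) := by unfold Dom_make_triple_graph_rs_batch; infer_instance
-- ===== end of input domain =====

-- B replaces A's single interleaved pass by three staged passes: build per-head records,
-- partition them into groups at the flush points with a counter, then emit each group with a
-- running start offset (objective: alternative decomposition, same cost). Return values only;
-- neither version mutates its arguments.

-- ===== PORT A =====
-- loop body of A's 'for head in batch_ents_order' (state: head_ori, head_map, tail_ori, start, edge_list_rs, tp_ents)
def pvStepA (path_list : List (Int × List Int)) (ent_map : List (Int × Int)) (interval : Int)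
    (s : List Int × List Int × List Int × Int × List (List (List Int) × List (List Int) × List Int) × List Int)
    (head : Int) :
    List Int × List Int × List Int × Int × List (List (List Int) × List (List Int) × List Int) × List Int :=
  let user_list := ((PySem.Dict.mk path_list).get? head).getD []
  let now_id := ((PySem.Dict.mk ent_map).get? head).getD 0
  let tp := s.2.2.2.2.2 ++ [now_id]
  -- inner 'for user in user_list' appending to the three parallel lists
  let t := user_list.foldl
      (fun (t : List Int × List Int × List Int) user =>
        (t.1 ++ [head], t.2.1 ++ [now_id - s.2.2.2.1], t.2.2 ++ [user]))
      (s.1, s.2.1, s.2.2.1)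
  if (t.2.1.length : Int) > interval then
    ([], [], [], now_id + 1, s.2.2.2.2.1 ++ [([t.2.1, t.2.2], [t.1, t.2.2], tp)], [])
  else
    (t.1, t.2.1, t.2.2, s.2.2.2.1, s.2.2.2.2.1, tp)

def make_triple_graph_rs_batch (path_list : List (Int × List Int)) (batch_ents : List Int) (ent_map : List (Int × Int)) (interval : Int) : List (List (List Int) × List (List Int) × List Int) :=
  let batch_ents_order := PySem.List.sorted batch_ents (fun x => ((PySem.Dict.mk ent_map).get? x).getD 0)
  let s := batch_ents_order.foldl (pvStepA path_list ent_map interval) ([], [], [], 0, [], [])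
  if s.2.1.length > 0 then
    s.2.2.2.2.1 ++ [([s.2.1, s.2.2.1], [s.1, s.2.2.1], s.2.2.2.2.2)]
  else
    s.2.2.2.2.1

-- ===== PORT B =====
-- pass 1 of Source B: the record (head, now_id, user_list) of one head
def pvRecOf (path_list : List (Int × List Int)) (ent_map : List (Int × Int)) (h : Int) : Int × Int × List Int :=
  (h, ((PySem.Dict.mk ent_map).get? h).getD 0, ((PySem.Dict.mk path_list).get? h).getD [])

-- pass 2 of Source B: loop body of 'for rec in records' (state: groups, cur, cnt)
def pvGroupStep (interval : Int)
    (s : List (List (Int × Int × List Int) × Bool) × List (Int × Int × List Int) × Int)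
    (r : Int × Int × List Int) :
    List (List (Int × Int × List Int) × Bool) × List (Int × Int × List Int) × Int :=
  let cur := s.2.1 ++ [r]
  let cnt := s.2.2 + (r.2.2.length : Int)
  if cnt > interval then (s.1 ++ [(cur, true)], [], 0) else (s.1, cur, cnt)

-- pass 3 of Source B: the tuple emitted for one group at offset start
def pvEmitG (grp : List (Int × Int × List Int)) (start : Int) : List (List Int) × List (List Int) × List Int :=
  ([grp.flatMap (fun r => r.2.2.map (fun _ => r.2.1 - start)), grp.flatMap (fun r => r.2.2)],
   [grp.flatMap (fun r => r.2.2.map (fun _ => r.1)), grp.flatMap (fun r => r.2.2)],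
   grp.map (fun r => r.2.1))

-- pass 3 of Source B: loop body of 'for grp, emit in groups' (state: out, start)
def pvEmitStep (s : List (List (List Int) × List (List Int) × List Int) × Int)
    (g : List (Int × Int × List Int) × Bool) :
    List (List (List Int) × List (List Int) × List Int) × Int :=
  ((if g.2 then s.1 ++ [pvEmitG g.1 s.2] else s.1),
   (g.1.getLast?.elim s.2 (fun r => r.2.1 + 1)))  -- grp[-1][1] + 1 (groups are never empty)

def make_triple_graph_rs_batch_alt (path_list : List (Int × List Int)) (batch_ents : List Int) (ent_map : List (Int × Int)) (interval : Int) : List (List (List Int) × List (List Int) × List Int) :=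
  let order := PySem.List.sorted batch_ents (fun x => ((PySem.Dict.mk ent_map).get? x).getD 0)
  let records := order.map (pvRecOf path_list ent_map)
  let g := records.foldl (pvGroupStep interval) ([], [], 0)
  let groups := if g.2.1 ≠ [] then g.1 ++ [(g.2.1, decide (g.2.2 > 0))] else g.1
  (groups.foldl pvEmitStep ([], 0)).1

-- ===== PRECONDITION & SPEC =====
-- Pre_ excludes exactly the inputs on which the Python A raises: a batch entity missing from
-- path_list (AssertionError / KeyError) or from ent_map (KeyError during sorting).
def Pre_make_triple_graph_rs_batch (path_list : List (Int × List Int)) (batch_ents : List Int) (ent_map : List (Int × Int)) (interval : Int) : Prop :=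
  ∀ x ∈ batch_ents, ((PySem.Dict.mk path_list).get? x).isSome ∧ ((PySem.Dict.mk ent_map).get? x).isSome
instance (path_list : List (Int × List Int)) (batch_ents : List Int) (ent_map : List (Int × Int)) (interval : Int) : Decidable (Pre_make_triple_graph_rs_batch path_list batch_ents ent_map interval) := by unfold Pre_make_triple_graph_rs_batch; infer_instance

def pvWitness_make_triple_graph_rs_batch : (List (Int × List Int)) × List Int × (List (Int × Int)) × Int :=
  ([(1, [5, 6]), (2, [7])], [2, 1, 2], [(1, 3), (2, 0)], 2)

def Spec_make_triple_graph_rs_batch (path_list : List (Int × List Int)) (batch_ents : List Int) (ent_map : List (Int × Int)) (interval : Int) (out : List (List (List Int) × List (List Int) × List Int)) : Prop := out = make_triple_graph_rs_batch_alt path_list batch_ents ent_map interval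
instance (path_list : List (Int × List Int)) (batch_ents : List Int) (ent_map : List (Int × Int)) (interval : Int) (out : List (List (List Int) × List (List Int) × List Int)) : Decidable (Spec_make_triple_graph_rs_batch path_list batch_ents ent_map interval out) := by unfold Spec_make_triple_graph_rs_batch; infer_instance

-- ===== CLAIM (what is proved, stated in full; the proofs are below) =====
def Claim_equal_make_triple_graph_rs_batch : Prop := ∀ (path_list : List (Int × List Int)) (batch_ents : List Int) (ent_map : List (Int × Int)) (interval : Int), Dom_make_triple_graph_rs_batch path_list batch_ents ent_map interval → Pre_make_triple_graph_rs_batch path_list batch_ents ent_map interval → Spec_make_triple_graph_rs_batch path_list batch_ents ent_map interval (make_triple_graph_rs_batch path_list batch_ents ent_map interval)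

-- ===== LEMMAS AND PROOFS =====

-- expansions of a pending group of records into A's three parallel lists and tp_ents
def pvExH (c : List (Int × Int × List Int)) : List Int := c.flatMap (fun r => r.2.2.map (fun _ => r.1))
def pvExM (c : List (Int × Int × List Int)) (start : Int) : List Int := c.flatMap (fun r => r.2.2.map (fun _ => r.2.1 - start))
def pvExT (c : List (Int × Int × List Int)) : List Int := c.flatMap (fun r => r.2.2)
def pvTps (c : List (Int × Int × List Int)) : List Int := c.map (fun r => r.2.1)

-- A's inner per-user loop, in closed form
lemma pvInner (head now_id start : Int) (ul : List Int) (ho hm tl : List Int) :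
    ul.foldl (fun (t : List Int × List Int × List Int) user =>
        (t.1 ++ [head], t.2.1 ++ [now_id - start], t.2.2 ++ [user])) (ho, hm, tl)
      = (ho ++ ul.map (fun _ => head), hm ++ ul.map (fun _ => now_id - start), tl ++ ul) := by
  induction ul generalizing ho hm tl with
  | nil => simp
  | cons u us ih => simp [List.foldl_cons, ih, List.append_assoc]

lemma pvExM_length (c : List (Int × Int × List Int)) (s : Int) :
    (pvExM c s).length = (pvExT c).length := by
  simp [pvExM, pvExT]

-- the grouping fold only appends to the groups component
lemma pvGroup_prefix (interval : Int) :
    ∀ (l : List (Int × Int × List Int)) gs cur cnt,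
      l.foldl (pvGroupStep interval) (gs, cur, cnt)
        = (gs ++ (l.foldl (pvGroupStep interval) ([], cur, cnt)).1,
           (l.foldl (pvGroupStep interval) ([], cur, cnt)).2) := by
  intro l
  induction l with
  | nil => intro gs cur cnt; simp
  | cons r t ih =>
    intro gs cur cnt
    simp only [List.foldl_cons, pvGroupStep]
    split_ifs with h
    · rw [ih (gs ++ [(cur ++ [r], true)]), ih ([] ++ [(cur ++ [r], true)])]
      simp
    · exact ih gs (cur ++ [r]) (cnt + r.2.2.length)

-- the counter equals the pending group's edge count
lemma pvCnt (interval : Int) :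
    ∀ (l : List (Int × Int × List Int)) (cur : List (Int × Int × List Int)),
      (l.foldl (pvGroupStep interval) ([], cur, ((pvExT cur).length : Int))).2.2
        = (((pvExT (l.foldl (pvGroupStep interval) ([], cur, ((pvExT cur).length : Int))).2.1).length : Int)) := by
  intro l
  induction l with
  | nil => intro cur; simp
  | cons r t ih =>
    intro cur
    simp only [List.foldl_cons, pvGroupStep]
    have hlen : ((pvExT cur).length : Int) + (r.2.2.length : Int) = ((pvExT (cur ++ [r])).length : Int) := by
      simp [pvExT]
    split_ifs with h
    · rw [pvGroup_prefix]
      have := ih []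
      simpa [pvExT] using this
    · rw [hlen]; exact ih (cur ++ [r])

-- main invariant: A's fold state is the staged pipeline applied to the remaining heads
lemma pvMain (path_list : List (Int × List Int)) (ent_map : List (Int × Int)) (interval : Int) :
    ∀ (l : List Int) (cur : List (Int × Int × List Int)) (start : Int)
      (out : List (List (List Int) × List (List Int) × List Int)),
      l.foldl (pvStepA path_list ent_map interval) (pvExH cur, pvExM cur start, pvExT cur, start, out, pvTps cur)
        = (let g := (l.map (pvRecOf path_list ent_map)).foldl (pvGroupStep interval) ([], cur, ((pvExT cur).length : Int));
           let e := g.1.foldl pvEmitStep (out, start);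
           (pvExH g.2.1, pvExM g.2.1 e.2, pvExT g.2.1, e.2, e.1, pvTps g.2.1)) := by
  intro l
  induction l with
  | nil => intro cur start out; simp
  | cons h t ih =>
    intro cur start out
    simp only [List.foldl_cons, List.map_cons]
    have hstep : pvStepA path_list ent_map interval (pvExH cur, pvExM cur start, pvExT cur, start, out, pvTps cur) h
        = (let r := pvRecOf path_list ent_map h;
           if (((pvExT (cur ++ [r])).length : Int)) > interval then
             ([], [], [], r.2.1 + 1, out ++ [pvEmitG (cur ++ [r]) start], [])
           else
             (pvExH (cur ++ [r]), pvExM (cur ++ [r]) start, pvExT (cur ++ [r]), start, out, pvTps (cur ++ [r]))) := by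
      simp only [pvStepA, pvRecOf, pvInner, pvEmitG, pvExH, pvExM, pvExT, pvTps]
      simp [List.flatMap_append]
    rw [hstep]
    simp only [pvGroupStep]
    have hlen : ((pvExT cur).length : Int) + (((pvRecOf path_list ent_map h).2.2.length : Int))
        = ((pvExT (cur ++ [pvRecOf path_list ent_map h])).length : Int) := by
      simp [pvExT]
    rw [← hlen]
    split_ifs with hfl
    · -- flush
      rw [pvGroup_prefix]
      have h0 : (pvExH ([] : List (Int × Int × List Int)), pvExM [] ((pvRecOf path_list ent_map h).2.1 + 1),
          pvExT ([] : List (Int × Int × List Int)), (pvRecOf path_list ent_map h).2.1 + 1,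
          out ++ [pvEmitG (cur ++ [pvRecOf path_list ent_map h]) start], pvTps ([] : List (Int × Int × List Int)))
          = (pvExH [], pvExM [] ((pvRecOf path_list ent_map h).2.1 + 1), pvExT [],
             (pvRecOf path_list ent_map h).2.1 + 1,
             out ++ [pvEmitG (cur ++ [pvRecOf path_list ent_map h]) start], pvTps []) := rfl
      have := ih [] ((pvRecOf path_list ent_map h).2.1 + 1)
        (out ++ [pvEmitG (cur ++ [pvRecOf path_list ent_map h]) start])
      simp only [pvExH, pvExM, pvExT, pvTps, List.flatMap_nil, List.map_nil,
        List.length_nil, Nat.cast_zero] at this ⊢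
      rw [this]
      congr 1
      rw [List.foldl_append]
      simp [pvEmitStep]
    · rw [hlen]; exact ih (cur ++ [pvRecOf path_list ent_map h]) start out

-- ===== VERDICT (by name: the statement is the Claim_ definition above) =====
theorem make_triple_graph_rs_batch_spec : Claim_equal_make_triple_graph_rs_batch := by
  unfold Claim_equal_make_triple_graph_rs_batch
  intro path_list batch_ents ent_map interval _ _
  unfold Spec_make_triple_graph_rs_batch make_triple_graph_rs_batch make_triple_graph_rs_batch_alt
  have h0 : (([], [], [], 0, [], []) :
      List Int × List Int × List Int × Int × List (List (List Int) × List (List Int) × List Int) × List Int)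
      = (pvExH [], pvExM [] 0, pvExT [], 0, [], pvTps []) := rfl
  rw [h0]
  dsimp only
  have hcnt0 : ((0 : Int)) = ((pvExT ([] : List (Int × Int × List Int))).length : Int) := by simp [pvExT]
  rw [pvMain]
  set l := PySem.List.sorted batch_ents (fun x => ((PySem.Dict.mk ent_map).get? x).getD 0) with hl
  simp only []
  set g := (l.map (pvRecOf path_list ent_map)).foldl (pvGroupStep interval)
      ([], [], ((pvExT ([] : List (Int × Int × List Int))).length : Int)) with hg
  have hcnt := pvCnt interval (l.map (pvRecOf path_list ent_map)) []
  rw [← hg] at hcnt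
  set e := g.1.foldl pvEmitStep (([] : List (List (List Int) × List (List Int) × List Int)), (0 : Int)) with he
  have hgsame : (l.map (pvRecOf path_list ent_map)).foldl (pvGroupStep interval) ([], [], (0 : Int)) = g := by
    rw [hg, ← hcnt0]
  rw [hgsame]
  by_cases hc : g.2.1 = []
  · simp [hc, pvExM, ← he]
  · simp only [hc, ne_eq, not_false_eq_true, if_pos]
    rw [List.foldl_append, ← he]
    simp only [pvEmitStep, List.foldl_cons, List.foldl_nil]
    have hml : (pvExM g.2.1 e.2).length = (pvExT g.2.1).length := pvExM_length _ _
    by_cases hp : (pvExT g.2.1).length > 0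
    · have hgt : g.2.2 > 0 := by rw [hcnt]; exact_mod_cast hp
      have hs : ¬ (List.map (fun a => a.2.2.length) g.2.1).sum = 0 := by
        have hp' := hp; simp [pvExT] at hp'; omega
      simp [hgt, hs, pvEmitG, pvExH, pvExM, pvExT, pvTps]
    · have : ¬ (g.2.2 > 0) := by rw [hcnt]; exact_mod_cast hp
      simp [hml, hp, this]
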